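-- pv_equiv track=rewrite | github.com/foxermen/codechef | PALIN.py | inc_half
-- ===== SOURCE A (Python) =====
-- def inc_char(ch):
--     return chr(ord(ch) + 1)
--
-- def inc_half(half):
--     cur = True
--     ls = [x for x in half[::-1]]
--     for i in range(len(half)):
--         if cur and ls[i] == '9':
--             ls[i] = '0'
--         else:
--             ls[i] = inc_char(ls[i])
--             cur = False
--             break
--     if cur:
--         ls.append('1')
--     return ''.join(ls[::-1])
-- ===== SOURCE B (Python) =====
-- def inc_char(ch):
--     return chr(ord(ch) + 1)
--
-- def inc_half(half):
--     stripped = half.rstrip('9')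
--     nines = len(half) - len(stripped)
--     if not stripped:
--         return '1' + '0' * nines
--     return stripped[:-1] + inc_char(stripped[-1]) + '0' * nines
-- ===== Notes on version B (the rewrite author's own statement) =====
-- stated objective: faster
-- what changed: Replaces A's reverse-list-and-carry loop (per-character mutation, break flag, re-reverse and join) with a boundary-locate-then-slice construction: rstrip the trailing '9's, then one slice plus one incremented character plus a run of '0's.
import Mathlib
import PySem

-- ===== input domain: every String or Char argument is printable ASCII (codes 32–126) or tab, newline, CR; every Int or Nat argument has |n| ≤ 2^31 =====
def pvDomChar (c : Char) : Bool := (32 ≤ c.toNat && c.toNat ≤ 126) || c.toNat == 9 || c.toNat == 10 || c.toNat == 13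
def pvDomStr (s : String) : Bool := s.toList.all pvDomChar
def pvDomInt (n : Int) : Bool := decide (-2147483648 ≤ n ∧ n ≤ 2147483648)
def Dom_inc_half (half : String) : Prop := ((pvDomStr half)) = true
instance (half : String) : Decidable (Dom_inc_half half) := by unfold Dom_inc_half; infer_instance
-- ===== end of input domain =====

-- B replaces A's reverse-and-carry loop by rstrip('9') + slice construction; proved equal on all inputs (total).

-- ===== PORT A =====
-- inc_char(ch) = chr(ord(ch) + 1)
def pvIncChar (c : Char) : Char := Char.ofNat (c.toNat + 1)

-- the for-loop over the reversed list: '9'→'0' while carrying; at the first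
-- non-'9' increment it, clear `cur` and break (rest of the list untouched)
def pvLoopA : List Char → (List Char × Bool)
  | [] => ([], true)
  | c :: rest =>
      if c == '9' then
        let p := pvLoopA rest
        ('0' :: p.1, p.2)
      else
        (pvIncChar c :: rest, false)

def inc_half (half : String) : String :=
  let ls := half.toList.reverse
  let p := pvLoopA ls
  let ls' := if p.2 then p.1 ++ ['1'] else p.1
  String.ofList ls'.reverse

-- ===== PORT B =====
-- stripped = half.rstrip('9'); nines = len(half) - len(stripped)
def inc_half_alt (half : String) : String :=
  let rev := half.toList.reverse
  let strippedRev := rev.dropWhile (· == '9')       -- rstrip('9'), reversed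
  let nines := half.toList.length - strippedRev.length
  match strippedRev with
  | [] => String.ofList ('1' :: List.replicate nines '0')
  | c :: t => String.ofList (t.reverse ++ pvIncChar c :: List.replicate nines '0')

-- ===== PRECONDITION & SPEC =====
def Spec_inc_half (half : String) (out : String) : Prop := out = inc_half_alt half
instance (half : String) (out : String) : Decidable (Spec_inc_half half out) := by unfold Spec_inc_half; infer_instance

-- ===== CLAIM (what is proved, stated in full; the proofs are below) =====
def Claim_equal_inc_half : Prop := ∀ (half : String), Dom_inc_half half → Spec_inc_half half (inc_half half)

-- ===== LEMMAS AND PROOFS =====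

-- characterisation of A's loop in terms of takeWhile/dropWhile
theorem pvLoopA_eq (l : List Char) :
    pvLoopA l = match l.dropWhile (· == '9') with
      | [] => (List.replicate l.length '0', true)
      | c :: t => (List.replicate (l.takeWhile (· == '9')).length '0' ++ pvIncChar c :: t, false) := by
  induction l with
  | nil => simp [pvLoopA]
  | cons c rest ih =>
    by_cases h : c == '9'
    · simp only [pvLoopA, h, if_pos, List.dropWhile_cons, List.takeWhile_cons]
      cases hd : rest.dropWhile (· == '9') with
      | nil => simp [ih, hd, List.replicate_succ]
      | cons d t => simp [ih, hd, List.replicate_succ]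
    · simp [pvLoopA, h]

theorem inc_half_eq_alt (half : String) : inc_half half = inc_half_alt half := by
  simp only [inc_half, inc_half_alt]
  rw [pvLoopA_eq]
  cases hd : half.toList.reverse.dropWhile (· == '9') with
  | nil =>
    have hlen : (half.toList.reverse.takeWhile (· == '9')).length = half.toList.reverse.length := by
      conv_rhs => rw [← List.takeWhile_append_dropWhile (p := (· == '9')) (l := half.toList.reverse)]
      simp [hd]
    simp [List.reverse_replicate]
  | cons c t =>
    have hlen : (half.toList.reverse.takeWhile (· == '9')).length
        = half.toList.length - (c :: t).length := by
      have := List.takeWhile_append_dropWhile (p := (· == '9')) (l := half.toList.reverse)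
      have hl : (half.toList.reverse.takeWhile (· == '9')).length + (c :: t).length
          = half.toList.length := by
        rw [← hd, ← List.length_append, this, List.length_reverse]
      omega
    simp [hlen, List.reverse_replicate]

-- ===== VERDICT (by name: the statement is the Claim_ definition above) =====
theorem inc_half_spec : Claim_equal_inc_half := by
  intro half _
  unfold Spec_inc_half
  exact inc_half_eq_alt half
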